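-- pv_equiv track=rewrite | github.com/bedwards/sonnet | Data_Packages_User/sonnet.py | get_final_vowel_sound
-- ===== SOURCE A (Python) =====
-- def get_final_vowel_sound(pronunciation):
--     final_vowel_sound = []
--     for p in reversed(pronunciation.split('-')):
--         if p == 'z':
--             p = 's'
--         final_vowel_sound.insert(0, p)
--         if '0' in p or '1' in p or '2' in p:
--             break
--     return final_vowel_sound
-- ===== SOURCE B (Python) =====
-- def get_final_vowel_sound(pronunciation):
--     parts = pronunciation.split('-')
--     start = 0
--     for i, p in enumerate(parts):
--         if '0' in p or '1' in p or '2' in p: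
--             start = i
--     return ['s' if p == 'z' else p for p in parts[start:]]
-- ===== Notes on version B (the rewrite author's own statement) =====
-- stated objective: simpler
-- what changed: Replaces the reversed collect-until-break loop with quadratic insert(0,..) by a forward scan that records the last stress-marked index and returns the z->s-mapped slice from it.
import Mathlib
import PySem

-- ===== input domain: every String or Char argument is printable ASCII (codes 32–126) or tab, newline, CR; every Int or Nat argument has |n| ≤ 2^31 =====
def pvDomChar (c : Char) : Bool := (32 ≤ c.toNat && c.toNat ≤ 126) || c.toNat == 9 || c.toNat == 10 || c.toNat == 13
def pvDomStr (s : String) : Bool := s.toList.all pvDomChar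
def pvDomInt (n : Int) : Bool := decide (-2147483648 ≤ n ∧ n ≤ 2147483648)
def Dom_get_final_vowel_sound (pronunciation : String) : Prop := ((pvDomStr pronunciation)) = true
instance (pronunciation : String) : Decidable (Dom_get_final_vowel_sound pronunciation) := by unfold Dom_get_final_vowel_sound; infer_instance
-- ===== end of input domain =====

-- B replaces A's reversed collect-until-break loop (with quadratic insert(0, _)) by a
-- forward scan for the last stress-marked part followed by a mapped slice; same return value.

-- ===== PORT A =====
-- '0' in p or '1' in p or '2' in p
def pvVowel (p : String) : Bool :=
  PySem.Str.isIn "0" p || PySem.Str.isIn "1" p || PySem.Str.isIn "2" p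

-- the for-loop over reversed(parts): insert(0, p) then break on a stress marker
def pvGoA : List String → List String
  | [] => []
  | p :: rest =>
      let p' := if p == "z" then "s" else p
      if pvVowel p' then [p'] else pvGoA rest ++ [p']

def get_final_vowel_sound (pronunciation : String) : List String :=
  pvGoA ((PySem.Str.split? pronunciation "-").getD []).reverse

-- ===== PORT B =====
def get_final_vowel_sound_alt (pronunciation : String) : List String :=
  let parts := (PySem.Str.split? pronunciation "-").getD []
  let start : Int :=
    (PySem.List.enumerate parts).foldl (fun acc ip => if pvVowel ip.2 then ip.1 else acc) 0
  (PySem.List.slice parts (some start) none).map (fun p => if p == "z" then "s" else p)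

-- ===== PRECONDITION & SPEC =====
def Spec_get_final_vowel_sound (pronunciation : String) (out : List String) : Prop := out = get_final_vowel_sound_alt pronunciation
instance (pronunciation : String) (out : List String) : Decidable (Spec_get_final_vowel_sound pronunciation out) := by unfold Spec_get_final_vowel_sound; infer_instance

-- ===== CLAIM (what is proved, stated in full; the proofs are below) =====
def Claim_equal_get_final_vowel_sound : Prop := ∀ (pronunciation : String), Dom_get_final_vowel_sound pronunciation → Spec_get_final_vowel_sound pronunciation (get_final_vowel_sound pronunciation)

-- ===== LEMMAS AND PROOFS =====

def pvStart (parts : List String) : Int :=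
  (PySem.List.enumerate parts).foldl (fun acc ip => if pvVowel ip.2 then ip.1 else acc) 0

lemma pvStart_append (L : List String) (x : String) :
    pvStart (L ++ [x]) = if pvVowel x then (L.length : Int) else pvStart L := by
  simp [pvStart, PySem.List.enumerate_append, List.foldl_append, PySem.List.enumerate]

lemma pvStart_bounds (L : List String) : 0 ≤ pvStart L ∧ pvStart L ≤ L.length := by
  induction L using List.reverseRecOn with
  | nil => simp [pvStart]
  | append_singleton L x ih =>
      rw [pvStart_append]
      split_ifs
      · simp
      · constructor
        · exact ih.1
        · simp; omega

lemma pvVowel_fix (p : String) : pvVowel (if p == "z" then "s" else p) = pvVowel p := by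
  split_ifs with h
  · have : p = "z" := by simpa using h
    subst this; decide
  · rfl

lemma pvCore (L : List String) :
    pvGoA L.reverse
      = (PySem.List.slice L (some (pvStart L)) none).map (fun p => if p == "z" then "s" else p) := by
  induction L using List.reverseRecOn with
  | nil => simp [pvStart, pvGoA, PySem.List.slice_none_none]
  | append_singleton L x ih =>
      rw [List.reverse_append]
      simp only [List.reverse_singleton, List.singleton_append, pvGoA]
      rw [pvVowel_fix, pvStart_append]
      by_cases hv : pvVowel x
      · simp only [hv, if_pos]
        rw [PySem.List.slice_from_natCast]
        simp
      · simp only [hv, if_neg, Bool.false_eq_true, not_false_iff, ih]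
        obtain ⟨h0, h1⟩ := pvStart_bounds L
        rw [PySem.List.slice_from _ h0, PySem.List.slice_from _ h0]
        rw [List.drop_append_of_le_length (by omega : (pvStart L).toNat ≤ L.length)]
        simp

-- ===== VERDICT (by name: the statement is the Claim_ definition above) =====
theorem get_final_vowel_sound_spec : Claim_equal_get_final_vowel_sound := by
  intro s _
  unfold Spec_get_final_vowel_sound get_final_vowel_sound get_final_vowel_sound_alt
  exact pvCore _
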